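-- pv_equiv track=rewrite | github.com/pypi-data/pypi-mirror-403 | packages/ibm-watsonx-ai-120b/ibm_watsonx_ai_120b-0.1.0.tar.gz/ibm_watsonx_ai_120b-0.1.0/reference/watsonx_client/adapters/message_adapter.py | inject_system_message
-- ===== SOURCE A (Python) =====
-- from typing import Dict, List, Any, Optional
--
-- def inject_system_message(
--     messages: List[Dict[str, Any]],
--     system_content: str,
--     replace: bool = True
-- ) -> List[Dict[str, Any]]:
--     """Inject or replace system message.
--
--     Args:
--         messages: Original messages
--         system_content: New system message content
--         replace: If True, replace existing system message; if False, prepend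
--
--     Returns:
--         Messages with system message injected
--     """
--     messages = messages.copy()
--     system_message = {"role": "system", "content": system_content}
--
--     # Find existing system message
--     system_index = next(
--         (i for i, msg in enumerate(messages) if msg.get("role") == "system"),
--         None
--     )
--
--     if system_index is not None:
--         if replace:
--             messages[system_index] = system_message
--         else:
--             # Prepend to existing system message
--             existing = messages[system_index].get("content", "")
--             messages[system_index] = {
--                 "role": "system",
--                 "content": f"{system_content}\n\n{existing}"
--             }
--     else:
--         # Insert at beginning
--         messages.insert(0, system_message)
--
--     return messages
-- ===== SOURCE B (Python) =====
-- def inject_system_message(messages, system_content, replace=True):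
--     """Recursive decomposition: rebuild(ms) returns the rebuilt tail once a
--     system message is found, or None if no system message occurs in ms."""
--     def rebuild(ms):
--         if not ms:
--             return None
--         head = ms[0]
--         if head.get("role") == "system":
--             if replace:
--                 new_head = {"role": "system", "content": system_content}
--             else:
--                 new_head = {"role": "system",
--                             "content": f"{system_content}\n\n{head.get('content', '')}"}
--             return [new_head] + ms[1:]
--         tail = rebuild(ms[1:])
--         return None if tail is None else [head] + tail
--
--     rebuilt = rebuild(messages)
--     if rebuilt is None:
--         return [{"role": "system", "content": system_content}] + messages
--     return rebuilt
-- ===== Notes on version B (the rewrite author's own statement) =====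
-- stated objective: alternative
-- what changed: Replaces the index search with next()-over-enumerate plus in-place mutation of a copied list by structural recursion: an Option-returning helper rebuilds the list around the first system message, and the None result triggers prepending.
import Mathlib
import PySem

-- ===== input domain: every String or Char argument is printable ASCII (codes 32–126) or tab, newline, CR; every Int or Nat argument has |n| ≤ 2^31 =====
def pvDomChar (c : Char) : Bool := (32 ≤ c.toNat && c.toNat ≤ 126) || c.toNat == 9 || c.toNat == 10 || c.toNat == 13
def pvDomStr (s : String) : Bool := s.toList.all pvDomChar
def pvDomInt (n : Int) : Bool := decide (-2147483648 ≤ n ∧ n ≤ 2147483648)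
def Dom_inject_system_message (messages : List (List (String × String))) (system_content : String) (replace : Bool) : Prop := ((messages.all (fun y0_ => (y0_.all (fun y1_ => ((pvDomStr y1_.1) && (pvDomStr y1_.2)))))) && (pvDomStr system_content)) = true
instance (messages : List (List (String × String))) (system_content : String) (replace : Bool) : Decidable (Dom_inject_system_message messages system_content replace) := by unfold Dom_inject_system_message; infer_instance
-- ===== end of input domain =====

-- B replaces the enumerate/next index search plus mutation of a copy by structural recursion with an Option result (same cost; A also only changes the returned list, not its argument).


-- ===== PORT A =====
-- msg.get(k): first-match lookup on the association-list representation of a Python dict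
def pvGet (m : List (String × String)) (k : String) : Option String :=
  (m.find? (fun p => p.1 == k)).map (·.2)

-- next((i for i, msg in enumerate(messages) if msg.get("role") == "system"), None)
def pvFindSysIdx : List (List (String × String)) → Nat → Option Nat
  | [], _ => none
  | m :: rest, i => if pvGet m "role" == some "system" then some i else pvFindSysIdx rest (i + 1)

def inject_system_message (messages : List (List (String × String))) (system_content : String) (replace : Bool) : List (List (String × String)) :=
  let system_message : List (String × String) := [("role", "system"), ("content", system_content)]
  match pvFindSysIdx messages 0 with
  | some i =>
    if replace then
      messages.set i system_message
    else
      -- messages[system_index].get("content", ""); i is a valid index, so getD i [] is that element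
      let existing := (pvGet (messages.getD i []) "content").getD ""
      messages.set i [("role", "system"), ("content", system_content ++ "\n\n" ++ existing)]
  | none => system_message :: messages

-- ===== PORT B =====
-- the replacement dict built from the first system message found (B's new_head)
def pvNewHead (system_content : String) (replace : Bool) (head : List (String × String)) : List (String × String) :=
  if replace then [("role", "system"), ("content", system_content)]
  else [("role", "system"), ("content", system_content ++ "\n\n" ++ (pvGet head "content").getD "")]

-- rebuild(ms): some rebuilt-list if ms contains a system message, none otherwise
def pvRebuild (system_content : String) (replace : Bool) : List (List (String × String)) → Option (List (List (String × String)))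
  | [] => none
  | head :: rest =>
    if pvGet head "role" == some "system" then some (pvNewHead system_content replace head :: rest)
    else (pvRebuild system_content replace rest).map (head :: ·)

def inject_system_message_alt (messages : List (List (String × String))) (system_content : String) (replace : Bool) : List (List (String × String)) :=
  match pvRebuild system_content replace messages with
  | none => [("role", "system"), ("content", system_content)] :: messages
  | some r => r

-- ===== PRECONDITION & SPEC =====
def Spec_inject_system_message (messages : List (List (String × String))) (system_content : String) (replace : Bool) (out : List (List (String × String))) : Prop := out = inject_system_message_alt messages system_content replace
instance (messages : List (List (String × String))) (system_content : String) (replace : Bool) (out : List (List (String × String))) : Decidable (Spec_inject_system_message messages system_content replace out) := by unfold Spec_inject_system_message; infer_instance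

-- ===== CLAIM (what is proved, stated in full; the proofs are below) =====
def Claim_equal_inject_system_message : Prop := ∀ (messages : List (List (String × String))) (system_content : String) (replace : Bool), Dom_inject_system_message messages system_content replace → Spec_inject_system_message messages system_content replace (inject_system_message messages system_content replace)

-- ===== LEMMAS AND PROOFS =====

theorem pvFindSysIdx_shift :
    ∀ (ms : List (List (String × String))) (i : Nat),
      pvFindSysIdx ms (i + 1) = (pvFindSysIdx ms i).map (· + 1) := by
  intro ms
  induction ms with
  | nil => intro i; rfl
  | cons m rest ih =>
    intro i
    by_cases h : pvGet m "role" == some "system" <;> simp [pvFindSysIdx, h, ih]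

-- B's recursion computes exactly "first system index, then set" (A's shape)
theorem pvRebuild_eq_find (sc : String) (rp : Bool) :
    ∀ (ms : List (List (String × String))),
      pvRebuild sc rp ms =
        (pvFindSysIdx ms 0).map (fun j => ms.set j (pvNewHead sc rp (ms.getD j []))) := by
  intro ms
  induction ms with
  | nil => simp [pvRebuild, pvFindSysIdx]
  | cons m rest ih =>
    by_cases h : pvGet m "role" == some "system"
    · simp [pvRebuild, pvFindSysIdx, h]
    · have hshift := pvFindSysIdx_shift rest 0
      simp only [pvRebuild, h, ih]
      rw [show pvFindSysIdx (m :: rest) 0 = pvFindSysIdx rest 1 by simp [pvFindSysIdx, h]]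
      rw [show (1 : Nat) = 0 + 1 by rfl, hshift]
      cases hfind : pvFindSysIdx rest 0 with
      | none => simp
      | some j => simp

-- ===== VERDICT (by name: the statement is the Claim_ definition above) =====
theorem inject_system_message_spec : Claim_equal_inject_system_message := by
  intro messages system_content replace _
  unfold Spec_inject_system_message inject_system_message inject_system_message_alt
  rw [pvRebuild_eq_find]
  cases hfind : pvFindSysIdx messages 0 with
  | none => simp
  | some j =>
    cases replace with
    | true => simp [pvNewHead]
    | false => simp [pvNewHead]
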